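-- pv_equiv track=rewrite | github.com/TianleJin/Algorithmic-Contests-Solutions | Google-Kickstart/Google-Kickstart-2020-Round-A/b.py | solve
-- ===== SOURCE A (Python) =====
-- def solve(N, K, P, beauty):
--     dp = [[0] * (P + 1) for _ in range(N + 1)]
--     for i in range(1, N + 1):
--         for j in range(1, P + 1):
--             total = 0
--             for k in range(min(K + 1, j + 1)):
--                 dp[i][j] = max(dp[i][j], dp[i - 1][j - k] + total)
--                 if k < K:
--                     total += beauty[i - 1][k]
--     return dp[N][P]
-- ===== SOURCE B (Python) =====
-- def solve(N, K, P, beauty):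
--     # Top-down memoized recursion instead of A's bottom-up 2-D table:
--     # best(i, j) = max beauty using the first i stacks with j plate-slots left.
--     memo = {}
--     def best(i, j):
--         if i == 0 or j == 0:
--             return 0
--         if (i, j) in memo:
--             return memo[(i, j)]
--         res = 0
--         acc = 0
--         for k in range(min(K + 1, j + 1)):
--             res = max(res, best(i - 1, j - k) + acc)
--             if k < K:
--                 acc += beauty[i - 1][k]
--         memo[(i, j)] = res
--         return res
--     return best(N, P)
-- ===== Notes on version B (the rewrite author's own statement) =====
-- stated objective: alternative
-- what changed: Replaces A's bottom-up (N+1)x(P+1) DP table filled cell-by-cell with a top-down memoized recursion best(i,j) that only evaluates the (i,j) states actually reachable from (N,P).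
import Mathlib
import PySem

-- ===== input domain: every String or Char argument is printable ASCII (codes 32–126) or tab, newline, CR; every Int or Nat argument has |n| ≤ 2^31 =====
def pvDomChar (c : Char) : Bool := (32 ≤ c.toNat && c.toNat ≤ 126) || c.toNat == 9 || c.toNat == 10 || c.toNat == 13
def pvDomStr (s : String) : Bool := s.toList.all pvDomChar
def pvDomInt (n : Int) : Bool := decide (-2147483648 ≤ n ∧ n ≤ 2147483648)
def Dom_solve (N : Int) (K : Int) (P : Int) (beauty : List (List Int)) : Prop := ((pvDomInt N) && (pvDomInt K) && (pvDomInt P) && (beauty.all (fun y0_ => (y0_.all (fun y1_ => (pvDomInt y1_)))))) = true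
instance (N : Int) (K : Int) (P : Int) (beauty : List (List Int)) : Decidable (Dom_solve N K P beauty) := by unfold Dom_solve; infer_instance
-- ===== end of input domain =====

-- B replaces A's bottom-up 2-D DP table with a top-down memoized recursion best(i, j)
-- that evaluates only the states reachable from (N, P) (objective: alternative).

-- ===== PORT A =====
-- Python lists with integer indexing/assignment are ported as Lean Arrays (O(1) access,
-- in-place update like Python); indices are nonnegative on every input Pre_solve admits.
def pvGet2 (dp : Array (Array Int)) (i j : Int) : Int :=
  (dp.getD i.toNat #[]).getD j.toNat 0

def pvSet2 (dp : Array (Array Int)) (i j : Int) (v : Int) : Array (Array Int) :=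
  dp.modify i.toNat (fun row => row.setIfInBounds j.toNat v)

def solve (N : Int) (K : Int) (P : Int) (beauty : List (List Int)) : Int :=
  let dp0 : Array (Array Int) :=
    ((PySem.List.pyRange 0 (N+1) 1).map (fun _ => Array.replicate (P+1).toNat (0:Int))).toArray
  let dpF := (PySem.List.pyRange 1 (N+1) 1).foldl (fun dp i =>
    (PySem.List.pyRange 1 (P+1) 1).foldl (fun dp j =>
      ((PySem.List.pyRange 0 (min (K+1) (j+1)) 1).foldl
        (fun (st : Array (Array Int) × Int) k =>
                    let dp := st.1
                    let total := st.2
                    let v := max (pvGet2 dp i j) (pvGet2 dp (i-1) (j-k) + total)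
                    (pvSet2 dp i j v,
                     if k < K then total + PySem.List.pyGetD (PySem.List.pyGetD beauty (i-1) []) k 0 else total))
        (dp, 0)).1) dp) dp0
  pvGet2 dpF N P

-- ===== PORT B =====
-- Source B's recursion best(i, j); its Python i counts stacks, so the Lean recursion is on that
-- count as a Nat (Python's `i == 0` base case is the Nat zero case, `beauty[i-1]` is row i-1).
-- The memo dict is pure caching of this same recursion and adds nothing to the value computed,
-- so the port is the uncached recursion.
def bestB (K : Int) (beauty : List (List Int)) : Nat → Int → Int
  | 0, _ => 0
  | i+1, j =>
    if j = 0 then 0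
    else
      ((PySem.List.pyRange 0 (min (K+1) (j+1)) 1).foldl
        (fun (st : Int × Int) k =>
          let res := st.1
          let acc := st.2
          (max res (bestB K beauty i (j - k) + acc),
           if k < K then acc + PySem.List.pyGetD (PySem.List.pyGetD beauty (i:Int) []) k 0 else acc))
        (0, 0)).1

def solve_alt (N : Int) (K : Int) (P : Int) (beauty : List (List Int)) : Int :=
  bestB K beauty N.toNat P

-- ===== PRECONDITION & SPEC =====
-- Pre_solve is exactly the set of inputs on which the Python A returns normally: it needs
-- N ≥ 0 and P ≥ 0 for the final dp[N][P] lookup, and, when all of N, P, K are positive,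
-- N stacks each holding at least min(K, P+1) plates (the beauty entries A actually reads).
def Pre_solve (N : Int) (K : Int) (P : Int) (beauty : List (List Int)) : Prop :=
  0 ≤ N ∧ 0 ≤ P ∧ (1 ≤ N → 1 ≤ P → 1 ≤ K →
    N ≤ (beauty.length : Int) ∧ ∀ r ∈ beauty.take N.toNat, min K (P+1) ≤ (r.length : Int))
instance (N : Int) (K : Int) (P : Int) (beauty : List (List Int)) : Decidable (Pre_solve N K P beauty) := by
  unfold Pre_solve; infer_instance

def pvWitness_solve : Int × Int × Int × List (List Int) := (2, 2, 3, [[3, 1], [4, 2]])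

def Spec_solve (N : Int) (K : Int) (P : Int) (beauty : List (List Int)) (out : Int) : Prop := out = solve_alt N K P beauty
instance (N : Int) (K : Int) (P : Int) (beauty : List (List Int)) (out : Int) : Decidable (Spec_solve N K P beauty out) := by unfold Spec_solve; infer_instance

-- ===== CLAIM (what is proved, stated in full; the proofs are below) =====
def Claim_equal_solve : Prop := ∀ (N : Int) (K : Int) (P : Int) (beauty : List (List Int)), Dom_solve N K P beauty → Pre_solve N K P beauty → Spec_solve N K P beauty (solve N K P beauty)

-- ===== LEMMAS AND PROOFS =====

-- prefix sums of a stack: pref row t = row[0] + ... + row[t-1] (read via pyGetD, as both ports read)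
def pref (row : List Int) : Nat → Int
  | 0 => 0
  | t+1 => pref row t + PySem.List.pyGetD row (t:Int) 0

-- the common functional model of the DP: mrec K beauty i j = best value using first i stacks, j slots
def mrec (K : Int) (beauty : List (List Int)) : Nat → Int → Int
  | 0 => fun _ => 0
  | s+1 => fun j =>
    (PySem.List.pyRange 0 (min (K+1) (j+1)) 1).foldl
      (fun acc k => max acc (mrec K beauty s (j - k) + pref (PySem.List.pyGetD beauty (s:Int) []) k.toNat)) 0

theorem mrec_succ (K : Int) (beauty : List (List Int)) (s : Nat) (j : Int) :
    mrec K beauty (s+1) j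
      = (PySem.List.pyRange 0 (min (K+1) (j+1)) 1).foldl
          (fun acc k => max acc (mrec K beauty s (j - k) + pref (PySem.List.pyGetD beauty (s:Int) []) k.toNat)) 0 := rfl

theorem mrec_zero (K : Int) (beauty : List (List Int)) (i : Nat) :
    mrec K beauty i 0 = 0 := by
  induction i with
  | zero => simp [mrec]
  | succ s ih =>
    rw [mrec_succ]
    by_cases h : K + 1 ≤ 0
    · rw [PySem.List.pyRange_one_eq_nil (by omega : min (K+1) (0+1) ≤ 0)]
      rfl
    · have hm : min (K+1) (0+1) = 1 := by omega
      rw [hm, PySem.List.pyRange_one_cons (by omega : (0:Int) < 1),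
          PySem.List.pyRange_one_eq_nil (show (1:Int) ≤ 0+1 by omega)]
      simp [ih, pref]

-- range with a clamped bound: range(0, c) = range(0, max(c,0))
theorem pyRange0_toNat (c : Int) :
    PySem.List.pyRange 0 c 1 = PySem.List.pyRange 0 ((c.toNat : Int)) 1 := by
  by_cases h : 0 ≤ c
  · rw [Int.toNat_of_nonneg h]
  · rw [PySem.List.pyRange_one_eq_nil (by omega), PySem.List.pyRange_one_eq_nil (by omega)]

-- ==== Array/List bridges (A's Array reads and writes, on list-built arrays) ====

theorem arr_getD {α : Type} (l : List α) (n : Nat) (d : α) :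
    (l.toArray).getD n d = l.getD n d := by
  rw [Array.getD_eq_getD_getElem?, List.getElem?_toArray, List.getD_eq_getElem?_getD]

theorem arr_set {α : Type} (l : List α) (n : Nat) (v : α) :
    (l.toArray).setIfInBounds n v = (l.set n v).toArray := by
  apply Array.toList_inj.mp
  simp [Array.toList_setIfInBounds]

theorem arr_modify {α : Type} (l : List α) (n : Nat) (f : α → α) :
    (l.toArray).modify n f = (l.modify n f).toArray := by
  apply Array.toList_inj.mp
  simp [Array.toList_modify]

theorem getD_map_pyRange {α : Type} (f : Int → α) (M i : Int) (d : α)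
    (h0 : 0 ≤ i) (h1 : i < M) :
    ((PySem.List.pyRange 0 M 1).map f).getD i.toNat d = f i := by
  have h := PySem.List.pyGetD_map_pyRange_of_nonneg f M i d h0 h1
  rwa [PySem.List.pyGetD_of_nonneg _ _ h0] at h

theorem pvGet2_mapmap (g : Int → Int → Int) (A B x y : Int)
    (hx0 : 0 ≤ x) (hx1 : x < A) (hy0 : 0 ≤ y) (hy1 : y < B) :
    pvGet2 (((PySem.List.pyRange 0 A 1).map (fun a => ((PySem.List.pyRange 0 B 1).map (g a)).toArray)).toArray) x y
      = g x y := by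
  unfold pvGet2
  rw [arr_getD (((PySem.List.pyRange 0 A 1).map (fun a => ((PySem.List.pyRange 0 B 1).map (g a)).toArray))) x.toNat #[]]
  rw [getD_map_pyRange _ _ _ _ hx0 hx1]
  rw [arr_getD, getD_map_pyRange _ _ _ _ hy0 hy1]

-- writing into a comprehension-built list rewrites its generating function at one point
theorem setRange {α : Type} (f : Int → α) (M i : Int) (v : α) (h0 : 0 ≤ i) (h1 : i < M) :
    ((PySem.List.pyRange 0 M 1).map f).set i.toNat v
      = (PySem.List.pyRange 0 M 1).map (fun x => if x = i then v else f x) := by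
  apply List.ext_getElem
  · simp
  · intro k hk1 hk2
    have hkr : k < (PySem.List.pyRange 0 M 1).length := by simpa using hk2
    simp only [List.getElem_set, List.getElem_map]
    rw [PySem.List.getElem_pyRange_one 0 M k hkr]
    simp only [zero_add]
    by_cases he : (k : Int) = i
    · rw [if_pos (by omega : i.toNat = k), if_pos he]
    · rw [if_neg (by omega : ¬ i.toNat = k), if_neg he]

-- ==== A-side: matrix forms ====

-- the dp matrix with rows < i final, row i final strictly below column j, the work cell (i,j)
-- holding the running maximum w, everything else the untouched zeros
def matK (K P N : Int) (beauty : List (List Int)) (i j : Int) (w : Int) : Array (Array Int) :=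
  ((PySem.List.pyRange 0 (N+1) 1).map (fun x =>
    ((PySem.List.pyRange 0 (P+1) 1).map (fun y =>
      if x = i ∧ y = j then w
      else if x < i ∨ (x = i ∧ y ≤ j - 1) then mrec K beauty x.toNat y else 0)).toArray)).toArray

-- the dp matrix with rows < i final and row i final up to column j
def matM (K P N : Int) (beauty : List (List Int)) (i j : Int) : Array (Array Int) :=
  ((PySem.List.pyRange 0 (N+1) 1).map (fun x =>
    ((PySem.List.pyRange 0 (P+1) 1).map (fun y =>
      if x < i ∨ (x = i ∧ y ≤ j) then mrec K beauty x.toNat y else 0)).toArray)).toArray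

-- the running maximum after t iterations of A's k-loop
def kaccF (K : Int) (beauty : List (List Int)) (i j : Int) (t : Nat) : Int :=
  (PySem.List.pyRange 0 (t:Int) 1).foldl
    (fun a k => max a (mrec K beauty (i-1).toNat (j-k) + pref (PySem.List.pyGetD beauty (i-1) []) k.toNat)) 0

theorem kaccF_succ (K : Int) (beauty : List (List Int)) (i j : Int) (t : Nat) :
    kaccF K beauty i j (t+1)
      = max (kaccF K beauty i j t)
          (mrec K beauty (i-1).toNat (j - (t:Int)) + pref (PySem.List.pyGetD beauty (i-1) []) t) := by
  unfold kaccF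
  rw [show ((t+1 : Nat) : Int) = (t : Int) + 1 by push_cast; ring,
      PySem.List.pyRange_one_succ_right (by omega), List.foldl_append]
  simp

theorem kaccF_end (K P N : Int) (beauty : List (List Int)) (i j : Int) (hi : 1 ≤ i) :
    kaccF K beauty i j ((min (K+1) (j+1)).toNat) = mrec K beauty i.toNat j := by
  have hs : i.toNat = (i-1).toNat + 1 := by omega
  rw [hs, mrec_succ]
  unfold kaccF
  rw [← pyRange0_toNat]
  rw [show (((i-1).toNat : Int)) = i - 1 by omega]

theorem pvGet2_matK (K P N : Int) (beauty : List (List Int)) (i j : Int) (w : Int)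
    (x y : Int) (hx0 : 0 ≤ x) (hx1 : x < N+1) (hy0 : 0 ≤ y) (hy1 : y < P+1) :
    pvGet2 (matK K P N beauty i j w) x y
      = (if x = i ∧ y = j then w
         else if x < i ∨ (x = i ∧ y ≤ j - 1) then mrec K beauty x.toNat y else 0) := by
  unfold matK
  exact pvGet2_mapmap
    (fun x y => if x = i ∧ y = j then w
      else if x < i ∨ (x = i ∧ y ≤ j - 1) then mrec K beauty x.toNat y else 0)
    (N+1) (P+1) x y hx0 hx1 hy0 hy1

theorem pvSet2_matK (K P N : Int) (beauty : List (List Int)) (i j : Int) (w v : Int)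
    (hi0 : 0 ≤ i) (hi1 : i < N+1) (hj0 : 0 ≤ j) (hj1 : j < P+1) :
    pvSet2 (matK K P N beauty i j w) i j v = matK K P N beauty i j v := by
  unfold pvSet2 matK
  rw [arr_modify, List.modify_eq_set,
      show (((PySem.List.pyRange 0 (N+1) 1).map (fun x =>
        ((PySem.List.pyRange 0 (P+1) 1).map (fun y =>
          if x = i ∧ y = j then w
          else if x < i ∨ (x = i ∧ y ≤ j - 1) then mrec K beauty x.toNat y else 0)).toArray))[i.toNat]?.getD default)
        = ((PySem.List.pyRange 0 (P+1) 1).map (fun y =>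
          if i = i ∧ y = j then w
          else if i < i ∨ (i = i ∧ y ≤ j - 1) then mrec K beauty i.toNat y else 0)).toArray from by
        rw [← List.getD_eq_getElem?_getD]
        exact getD_map_pyRange _ _ _ _ hi0 hi1]
  simp only []
  rw [arr_set, setRange _ _ _ _ hj0 hj1, setRange _ _ _ _ hi0 hi1]
  apply congrArg List.toArray
  apply List.map_congr_left
  intro x hx
  by_cases hxi : x = i
  · subst hxi
    rw [if_pos rfl]
    apply congrArg List.toArray
    apply List.map_congr_left
    intro y hy
    by_cases hyj : y = j
    · simp [hyj]
    · simp [hyj]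
  · rw [if_neg hxi]
    apply congrArg List.toArray
    apply List.map_congr_left
    intro y hy
    have h1 : ¬ (x = i ∧ y = j) := by tauto
    simp [h1]

-- A's k-loop invariant
theorem kfold_inv (K P N : Int) (beauty : List (List Int)) (i j : Int)
    (hi : 1 ≤ i) (hiN : i ≤ N) (hj : 1 ≤ j) (hjP : j ≤ P) :
    ∀ (t : Nat), (t:Int) ≤ max (min (K+1) (j+1)) 0 →
    (PySem.List.pyRange 0 (t:Int) 1).foldl
      (fun (st : Array (Array Int) × Int) k =>
                  let dp := st.1
                  let total := st.2
                  let v := max (pvGet2 dp i j) (pvGet2 dp (i-1) (j-k) + total)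
                  (pvSet2 dp i j v,
                   if k < K then total + PySem.List.pyGetD (PySem.List.pyGetD beauty (i-1) []) k 0 else total))
      (matK K P N beauty i j 0, 0)
    = (matK K P N beauty i j (kaccF K beauty i j t),
       pref (PySem.List.pyGetD beauty (i-1) []) (min (t:Int) K).toNat) := by
  intro t
  induction t with
  | zero =>
    intro _
    simp only [Nat.cast_zero]
    rw [PySem.List.pyRange_one_eq_nil (le_refl 0)]
    simp only [List.foldl_nil]
    rw [show (min (0:Int) K).toNat = 0 by omega]
    have h2 : kaccF K beauty i j 0 = 0 := by
      unfold kaccF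
      simp only [Nat.cast_zero]
      rw [PySem.List.pyRange_one_eq_nil (le_refl 0)]
      rfl
    rw [h2]
    rfl
  | succ t ih =>
    intro ht
    have htlt : (t:Int) < min (K+1) (j+1) := by push_cast at ht; omega
    have htle : (t:Int) ≤ max (min (K+1) (j+1)) 0 := by omega
    rw [show ((t+1 : Nat) : Int) = (t : Int) + 1 by push_cast; ring,
        PySem.List.pyRange_one_succ_right (by omega), List.foldl_append,
        ih htle]
    have htK : (t:Int) ≤ K := by omega
    have htj : (t:Int) ≤ j := by omega
    have hminK : (min (t:Int) K).toNat = t := by omega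
    simp only [List.foldl_cons, List.foldl_nil]
    rw [pvGet2_matK _ _ _ _ _ _ _ _ _ (by omega) (by omega) (by omega) (by omega)]
    rw [pvGet2_matK _ _ _ _ _ _ _ _ _ (by omega) (by omega) (by omega) (by omega)]
    rw [pvSet2_matK _ _ _ _ _ _ _ _ (by omega) (by omega) (by omega) (by omega)]
    have hii : ¬ (i - 1 = i ∧ j - (t:Int) = j) := by omega
    have hlt : i - 1 < i ∨ (i - 1 = i ∧ j - (t:Int) ≤ j - 1) := by omega
    rw [if_pos ⟨rfl, rfl⟩, if_neg hii, if_pos hlt, hminK]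
    simp only [Prod.mk.injEq]
    refine ⟨?_, ?_⟩
    · rw [kaccF_succ]
    · by_cases hk : (t:Int) < K
      · rw [if_pos hk, show (min ((t:Int)+1) K).toNat = t + 1 by omega]
        rfl
      · rw [if_neg hk, show (min ((t:Int)+1) K).toNat = (min (t:Int) K).toNat by omega, hminK]

theorem matK_done (K P N : Int) (beauty : List (List Int)) (i j : Int)
    (hi : 1 ≤ i) :
    matK K P N beauty i j (mrec K beauty i.toNat j) = matM K P N beauty i j := by
  unfold matK matM
  apply congrArg List.toArray
  apply List.map_congr_left
  intro x hx
  apply congrArg List.toArray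
  apply List.map_congr_left
  intro y hy
  by_cases hxy : x = i ∧ y = j
  · obtain ⟨hx', hy'⟩ := hxy
    subst hx'; subst hy'
    simp
  · rw [if_neg hxy]
    have hiff : (x < i ∨ (x = i ∧ y ≤ j - 1)) ↔ (x < i ∨ (x = i ∧ y ≤ j)) := by
      constructor <;> intro h <;> rcases h with h | ⟨h1, h2⟩
      · exact Or.inl h
      · exact Or.inr ⟨h1, by omega⟩
      · exact Or.inl h
      · rcases eq_or_lt_of_le h2 with he | hl
        · exact absurd ⟨h1, he⟩ hxy
        · exact Or.inr ⟨h1, by omega⟩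
    rw [if_congr hiff rfl rfl]

theorem matM_start (K P N : Int) (beauty : List (List Int)) (i j : Int)
    (hj : 0 ≤ j) :
    matM K P N beauty i j = matK K P N beauty i (j+1) 0 := by
  unfold matK matM
  apply congrArg List.toArray
  apply List.map_congr_left
  intro x hx
  apply congrArg List.toArray
  apply List.map_congr_left
  intro y hy
  have hy' : 0 ≤ y := by
    rw [PySem.List.mem_pyRange_one] at hy; omega
  by_cases hxy : x = i ∧ y = j + 1
  · rw [if_pos hxy]
    rw [if_neg (by omega : ¬ (x < i ∨ (x = i ∧ y ≤ j)))]
  · rw [if_neg hxy]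
    have hiff : (x < i ∨ (x = i ∧ y ≤ j)) ↔ (x < i ∨ (x = i ∧ y ≤ (j+1) - 1)) := by omega
    rw [if_congr hiff rfl rfl]

-- the j-loop
theorem jloop (K P N : Int) (beauty : List (List Int)) (i : Int)
    (hi : 1 ≤ i) (hiN : i ≤ N) :
    ∀ (t : Nat), (t:Int) ≤ P →
    (PySem.List.pyRange 1 ((t:Int)+1) 1).foldl
      (fun dp j =>
        ((PySem.List.pyRange 0 (min (K+1) (j+1)) 1).foldl
          (fun (st : Array (Array Int) × Int) k =>
                      let dp := st.1
                      let total := st.2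
                      let v := max (pvGet2 dp i j) (pvGet2 dp (i-1) (j-k) + total)
                      (pvSet2 dp i j v,
                       if k < K then total + PySem.List.pyGetD (PySem.List.pyGetD beauty (i-1) []) k 0 else total))
          (dp, 0)).1)
      (matM K P N beauty i 0)
    = matM K P N beauty i (t:Int) := by
  intro t
  induction t with
  | zero =>
    intro _
    simp only [Nat.cast_zero, zero_add]
    rw [PySem.List.pyRange_one_eq_nil (le_refl (1:Int))]
    rfl
  | succ t ih =>
    intro ht
    have htP : (t:Int) ≤ P := by push_cast at ht ⊢; omega
    rw [show ((t+1 : Nat) : Int) = (t:Int) + 1 by push_cast; ring,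
        PySem.List.pyRange_one_succ_right (by omega), List.foldl_append, ih htP]
    simp only [List.foldl_cons, List.foldl_nil]
    rw [matM_start K P N beauty i (t:Int) (by omega)]
    have hkf := kfold_inv K P N beauty i ((t:Int)+1) hi hiN (by omega) (by push_cast at ht; omega)
      ((min (K+1) ((t:Int)+1+1)).toNat) (by omega)
    rw [← pyRange0_toNat] at hkf
    rw [hkf]
    simp only []
    rw [kaccF_end K P N beauty i ((t:Int)+1) hi, matK_done K P N beauty i ((t:Int)+1) hi]

-- the outer i-loop
theorem iloop (K P N : Int) (beauty : List (List Int)) (hP : 0 ≤ P) :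
    ∀ (s : Nat), (s:Int) ≤ N →
    (PySem.List.pyRange 1 ((s:Int)+1) 1).foldl
      (fun dp i =>
        (PySem.List.pyRange 1 (P+1) 1).foldl
          (fun dp j =>
            ((PySem.List.pyRange 0 (min (K+1) (j+1)) 1).foldl
              (fun (st : Array (Array Int) × Int) k =>
                          let dp := st.1
                          let total := st.2
                          let v := max (pvGet2 dp i j) (pvGet2 dp (i-1) (j-k) + total)
                          (pvSet2 dp i j v,
                           if k < K then total + PySem.List.pyGetD (PySem.List.pyGetD beauty (i-1) []) k 0 else total))
              (dp, 0)).1) dp)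
      (matM K P N beauty 0 P)
    = matM K P N beauty (s:Int) P := by
  intro s
  induction s with
  | zero =>
    intro _
    simp only [Nat.cast_zero, zero_add]
    rw [PySem.List.pyRange_one_eq_nil (le_refl (1:Int))]
    rfl
  | succ s ih =>
    intro hs
    have hsN : (s:Int) ≤ N := by push_cast at hs ⊢; omega
    rw [show ((s+1 : Nat) : Int) = (s:Int) + 1 by push_cast; ring,
        PySem.List.pyRange_one_succ_right (a := 1) (b := (s:Int)+1) (by omega),
        List.foldl_append, ih hsN]
    simp only [List.foldl_cons, List.foldl_nil]
    have hshift : matM K P N beauty (s:Int) P = matM K P N beauty ((s:Int)+1) 0 := by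
      unfold matM
      apply congrArg List.toArray
      apply List.map_congr_left
      intro x hx
      apply congrArg List.toArray
      apply List.map_congr_left
      intro y hy
      rw [PySem.List.mem_pyRange_one] at hx hy
      by_cases hc : x = (s:Int) + 1 ∧ y ≤ 0
      · have hy0 : y = 0 := by omega
        rw [if_neg (by omega : ¬ (x < (s:Int) ∨ (x = (s:Int) ∧ y ≤ P))),
            if_pos (Or.inr hc), hy0, mrec_zero]
      · have hiff : (x < (s:Int) ∨ (x = (s:Int) ∧ y ≤ P)) ↔ (x < (s:Int)+1 ∨ (x = (s:Int)+1 ∧ y ≤ 0)) := by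
          constructor <;> intro h
          · left
            rcases h with h | ⟨h1, _⟩ <;> omega
          · rcases h with h | h
            · rcases lt_or_ge x (s:Int) with h' | h'
              · exact Or.inl h'
              · exact Or.inr ⟨by omega, by omega⟩
            · exact absurd h hc
        rw [if_congr hiff rfl rfl]
    rw [hshift]
    have hjl := jloop K P N beauty ((s:Int)+1) (by omega) (by omega) P.toNat (by omega)
    rw [show ((P.toNat : Int)) = P by omega] at hjl
    exact hjl

theorem solveA (N K P : Int) (beauty : List (List Int)) (hN : 0 ≤ N) (hP : 0 ≤ P) :
    solve N K P beauty = mrec K beauty N.toNat P := by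
  simp only [solve]
  have hdp0 : (((PySem.List.pyRange 0 (N+1) 1).map (fun _ => Array.replicate (P+1).toNat (0:Int))).toArray)
      = matM K P N beauty 0 P := by
    unfold matM
    apply congrArg List.toArray
    apply List.map_congr_left
    intro x hx
    rw [PySem.List.mem_pyRange_one] at hx
    rw [← List.toArray_replicate]
    apply congrArg List.toArray
    have hmap : (PySem.List.pyRange 0 (P+1) 1).map
        (fun y => if x < 0 ∨ (x = 0 ∧ y ≤ P) then mrec K beauty x.toNat y else 0)
        = (PySem.List.pyRange 0 (P+1) 1).map (fun _ => (0:Int)) := by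
      apply List.map_congr_left
      intro y hy
      by_cases hc : x < 0 ∨ (x = 0 ∧ y ≤ P)
      · rw [if_pos hc, show x = 0 by omega]
        exact mrec_zero K beauty ((0:Int)).toNat
      · rw [if_neg hc]
    rw [hmap, List.map_const', PySem.List.length_pyRange_one]
    congr 1
    omega
  rw [hdp0]
  have hil := iloop K P N beauty hP N.toNat (by omega)
  rw [show ((N.toNat : Int)) = N by omega] at hil
  rw [hil]
  unfold matM
  rw [pvGet2_mapmap (fun x y => if x < N ∨ (x = N ∧ y ≤ P) then mrec K beauty x.toNat y else 0)
        (N+1) (P+1) N P hN (by omega) hP (by omega)]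
  rw [if_pos (Or.inr ⟨rfl, le_refl P⟩)]

-- ==== B-side: the (res, acc) pair of B's loop, for an arbitrary recursive-value function f ====

theorem pairfoldB (K : Int) (row : List Int) (f : Int → Int) :
    ∀ (t : Nat), (t:Int) ≤ max (K + 1) 0 →
    (PySem.List.pyRange 0 (t:Int) 1).foldl
      (fun (st : Int × Int) k =>
        let res := st.1
        let acc := st.2
        (max res (f k + acc),
         if k < K then acc + PySem.List.pyGetD row k 0 else acc))
      (0, 0)
    = ((PySem.List.pyRange 0 (t:Int) 1).foldl (fun a k => max a (f k + pref row k.toNat)) 0,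
       pref row (min (t:Int) K).toNat) := by
  intro t
  induction t with
  | zero =>
    intro _
    simp only [Nat.cast_zero]
    rw [PySem.List.pyRange_one_eq_nil (le_refl 0)]
    simp only [List.foldl_nil]
    rw [show (min (0:Int) K).toNat = 0 by omega]
    rfl
  | succ t ih =>
    intro ht
    have htK : (t:Int) ≤ K := by push_cast at ht; omega
    rw [show ((t+1 : Nat) : Int) = (t : Int) + 1 by push_cast; ring,
        PySem.List.pyRange_one_succ_right (by omega)]
    rw [List.foldl_append, List.foldl_append, ih (by omega)]
    simp only [List.foldl_cons, List.foldl_nil]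
    have hminK : (min (t:Int) K).toNat = t := by omega
    rw [hminK]
    simp only [Prod.mk.injEq]
    refine ⟨rfl, ?_⟩
    by_cases hk : (t:Int) < K
    · rw [if_pos hk, show (min ((t:Int)+1) K).toNat = t + 1 by omega]
      rfl
    · rw [if_neg hk, show (min ((t:Int)+1) K).toNat = t by omega]

-- B's recursion computes the model mrec on every nonnegative budget
theorem bestB_eq_mrec (K : Int) (beauty : List (List Int)) :
    ∀ (i : Nat) (j : Int), 0 ≤ j → bestB K beauty i j = mrec K beauty i j := by
  intro i
  induction i with
  | zero => intro j _; rfl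
  | succ s ih =>
    intro j hj
    by_cases hj0 : j = 0
    · rw [hj0, mrec_zero]
      rfl
    · have hj1 : 1 ≤ j := by omega
      rw [mrec_succ]
      show (if j = 0 then 0 else _) = _
      rw [if_neg hj0]
      have hpf := pairfoldB K (PySem.List.pyGetD beauty (s:Int) [])
        (fun k => bestB K beauty s (j - k)) ((min (K+1) (j+1)).toNat)
        (by omega)
      rw [← pyRange0_toNat] at hpf
      rw [hpf]
      simp only []
      apply PySem.List.foldl_congr_mem
      intro acc k hk
      rw [PySem.List.mem_pyRange_one] at hk
      rw [ih (j - k) (by omega)]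

theorem solveB (N K P : Int) (beauty : List (List Int)) (hP : 0 ≤ P) :
    solve_alt N K P beauty = mrec K beauty N.toNat P := by
  unfold solve_alt
  exact bestB_eq_mrec K beauty N.toNat P hP

-- ===== VERDICT (by name: the statement is the Claim_ definition above) =====
theorem solve_spec : Claim_equal_solve := by
  intro N K P beauty _ hpre
  unfold Pre_solve at hpre
  obtain ⟨hN, hP, _⟩ := hpre
  unfold Spec_solve
  rw [solveA N K P beauty hN hP, solveB N K P beauty hP]
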